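-- pv_equiv track=rewrite | github.com/dnussbaum/localperspectives | src/article_extractor/extract.py | searchForCountries
-- ===== SOURCE A (Python) =====
-- def searchForCountries(text):
--     one_word_countries = {
--       "Saudi" : "Saudi Arabia",
--       "Korea": "South Korea",
--       "Emirates" : "United Arab Emirates",
--       "Britian" : "Great Britain"
--     }
--
--     countries = dict()
--     words = text.split()
--     for word in words:
--         if word in one_word_countries.keys():
--             if countries.get(word) is None:
--                 countries[word] = 0
--             else:
--                 countries[word] += 1
--
--     c = countries.keys()
--     toreturn = []
--
--     for country in c:
--         toreturn.append((one_word_countries.get(country), 1))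
--
--     return toreturn
-- ===== SOURCE B (Python) =====
-- def searchForCountries(text):
--     one_word_countries = {
--       "Saudi" : "Saudi Arabia",
--       "Korea": "South Korea",
--       "Emirates" : "United Arab Emirates",
--       "Britian" : "Great Britain"
--     }
--
--     # Per-keyword search: locate each known keyword's first occurrence,
--     # then order the found ones by that position.
--     words = text.split()
--     hits = []
--     for key, name in one_word_countries.items():
--         if key in words:
--             hits.append((words.index(key), name))
--     hits.sort(key=lambda h: h[0])
--     return [(name, 1) for _, name in hits]
-- ===== Notes on version B (the rewrite author's own statement) =====
-- stated objective: alternative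
-- what changed: Instead of A's single scan over the words building a count dict and then mapping over its keys, B searches per keyword: for each of the four known keywords it finds the first occurrence position with list.index, sorts the found keywords by that position, and emits (full_name, 1) in that order.
import Mathlib
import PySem

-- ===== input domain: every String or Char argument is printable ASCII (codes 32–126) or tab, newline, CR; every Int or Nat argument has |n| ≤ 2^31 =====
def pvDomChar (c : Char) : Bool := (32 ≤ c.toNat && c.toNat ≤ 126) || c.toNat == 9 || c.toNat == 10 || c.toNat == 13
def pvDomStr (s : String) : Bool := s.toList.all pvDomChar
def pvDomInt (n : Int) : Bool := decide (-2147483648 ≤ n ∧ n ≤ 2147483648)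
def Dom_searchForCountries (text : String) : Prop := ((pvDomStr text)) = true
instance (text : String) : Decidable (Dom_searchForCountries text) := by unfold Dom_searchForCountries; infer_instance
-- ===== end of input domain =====

-- B replaces A's single scan over the words (count dict, then a keys pass) with a
-- per-keyword search: find each known keyword's first position, sort by position
-- (objective: alternative decomposition, same result).

-- The one_word_countries literal, shared data of both versions.
def pvOWC : PySem.Dict String String :=
  PySem.Dict.ofList [("Saudi", "Saudi Arabia"), ("Korea", "South Korea"),
                     ("Emirates", "United Arab Emirates"), ("Britian", "Great Britain")]

-- ===== PORT A =====
-- A's `one_word_countries.get(country)` always hits (countries' keys ⊆ pvOWC's keys),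
-- ported as get? with getD "" discharging the impossible None.
def searchForCountries (text : String) : List (String × Int) :=
  let words := PySem.Str.split₀ text
  let countries := words.foldl
    (fun (d : PySem.Dict String Int) word =>
      if pvOWC.contains word then
        match d.get? word with
        | none => d.insert word 0
        | some v => d.insert word (v + 1)
      else d)
    PySem.Dict.empty
  countries.keys.map (fun country => ((pvOWC.get? country).getD "", (1 : Int)))

-- ===== PORT B =====
-- `words.index(key)` is guarded by `key in words`, so index? is always some;
-- getD 0 only discharges the impossible none.
def searchForCountries_alt (text : String) : List (String × Int) :=
  let words := PySem.Str.split₀ text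
  let hits := (PySem.Dict.items pvOWC).foldl
    (fun (acc : List (Nat × String)) kv =>
      if words.contains kv.1 then acc ++ [((PySem.List.index? words kv.1).getD 0, kv.2)]
      else acc)
    []
  (PySem.List.sorted hits (fun h => h.1) false).map (fun h => (h.2, (1 : Int)))

-- ===== PRECONDITION & SPEC =====
def Spec_searchForCountries (text : String) (out : List (String × Int)) : Prop := out = searchForCountries_alt text
instance (text : String) (out : List (String × Int)) : Decidable (Spec_searchForCountries text out) := by unfold Spec_searchForCountries; infer_instance

-- ===== CLAIM (what is proved, stated in full; the proofs are below) =====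
def Claim_equal_searchForCountries : Prop := ∀ (text : String), Dom_searchForCountries text → Spec_searchForCountries text (searchForCountries text)

-- ===== LEMMAS AND PROOFS =====

-- Reference: the keywords of `words` in first-occurrence order, by front recursion.
def pvG : List String → List String
  | [] => []
  | w :: ws => if pvOWC.contains w then w :: (pvG ws).filter (fun c => c != w) else pvG ws

-- first index of c in ws (total; used only where c ∈ ws)
def pvIdx (ws : List String) (c : String) : Nat := (PySem.List.index? ws c).getD 0

def pvName (c : String) : String := (pvOWC.get? c).getD ""

theorem pvG_mem (ws : List String) (c : String) :
    c ∈ pvG ws ↔ pvOWC.contains c = true ∧ c ∈ ws := by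
  induction ws with
  | nil => simp [pvG]
  | cons w ws ih =>
    by_cases hk : pvOWC.contains w = true
    · simp only [pvG, hk, if_true, List.mem_cons, List.mem_filter, ih, bne_iff_ne]
      constructor
      · rintro (rfl | ⟨⟨hc, hm⟩, _⟩)
        · exact ⟨hk, Or.inl rfl⟩
        · exact ⟨hc, Or.inr hm⟩
      · rintro ⟨hc, rfl | hm⟩
        · exact Or.inl rfl
        · by_cases hcw : c = w
          · exact Or.inl hcw
          · exact Or.inr ⟨⟨hc, hm⟩, hcw⟩
    · have hk' : pvOWC.contains w = false := by simpa using hk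
      simp only [pvG, hk', Bool.false_eq_true, if_false, ih, List.mem_cons]
      constructor
      · rintro ⟨h1, h2⟩; exact ⟨h1, Or.inr h2⟩
      · rintro ⟨h1, h2 | h2⟩
        · subst h2; exact absurd h1 hk
        · exact ⟨h1, h2⟩

theorem pvG_nodup (ws : List String) : (pvG ws).Nodup := by
  induction ws with
  | nil => simp [pvG]
  | cons w ws ih =>
    by_cases hk : pvOWC.contains w = true
    · simp only [pvG, hk, if_true]
      refine List.Nodup.cons ?_ (ih.filter _)
      intro hmem
      rcases List.mem_filter.1 hmem with ⟨_, hne⟩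
      simp at hne
    · have hk' : pvOWC.contains w = false := by simpa using hk
      simpa [pvG, hk'] using ih

theorem pvG_pairwise (ws : List String) :
    (pvG ws).Pairwise (fun a b => pvIdx ws a < pvIdx ws b) := by
  induction ws with
  | nil => simp [pvG]
  | cons w ws ih =>
    have idx_shift : ∀ c, c ≠ w → c ∈ ws →
        ∃ i, PySem.List.index? ws c = some i ∧ pvIdx (w :: ws) c = i + 1 := by
      intro c hne hmem
      rcases Option.isSome_iff_exists.1 ((PySem.List.index?_isSome_iff ws c).2 hmem)
        with ⟨i, hi⟩
      refine ⟨i, hi, ?_⟩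
      have hne' : w ≠ c := fun h => hne h.symm
      unfold pvIdx
      rw [PySem.List.index?_cons_of_ne ws hne', hi]
      rfl
    by_cases hk : pvOWC.contains w = true
    · simp only [pvG, hk, if_true]
      constructor
      · intro b hb
        rcases List.mem_filter.1 hb with ⟨hbG, hbne⟩
        have hbne' : b ≠ w := by simpa [bne_iff_ne] using hbne
        have hbws : b ∈ ws := ((pvG_mem ws b).1 hbG).2
        rcases idx_shift b hbne' hbws with ⟨i, _, he⟩
        have hw : pvIdx (w :: ws) w = 0 := by
          unfold pvIdx
          rw [PySem.List.index?_cons_self]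
          rfl
        omega
      · have hsub : ((pvG ws).filter (fun c => c != w)).Sublist (pvG ws) :=
          List.filter_sublist
        have hP := List.Pairwise.sublist hsub ih
        refine List.Pairwise.imp_of_mem ?_ hP
        intro a b ha hb hab
        rcases List.mem_filter.1 ha with ⟨haG, hane⟩
        rcases List.mem_filter.1 hb with ⟨hbG, hbne⟩
        rcases idx_shift a (by simpa [bne_iff_ne] using hane) ((pvG_mem ws a).1 haG).2
          with ⟨i, hi, he1⟩
        rcases idx_shift b (by simpa [bne_iff_ne] using hbne) ((pvG_mem ws b).1 hbG).2
          with ⟨j, hj, he2⟩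
        have : pvIdx ws a = i := by unfold pvIdx; rw [hi]; rfl
        have : pvIdx ws b = j := by unfold pvIdx; rw [hj]; rfl
        omega
    · have hk' : pvOWC.contains w = false := by simpa using hk
      simp only [pvG, hk', Bool.false_eq_true, if_false]
      refine List.Pairwise.imp_of_mem ?_ ih
      intro a b ha hb hab
      have hane : a ≠ w := fun h => hk (h ▸ ((pvG_mem ws a).1 ha).1)
      have hbne : b ≠ w := fun h => hk (h ▸ ((pvG_mem ws b).1 hb).1)
      rcases idx_shift a hane ((pvG_mem ws a).1 ha).2 with ⟨i, hi, he1⟩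
      rcases idx_shift b hbne ((pvG_mem ws b).1 hb).2 with ⟨j, hj, he2⟩
      have : pvIdx ws a = i := by unfold pvIdx; rw [hi]; rfl
      have : pvIdx ws b = j := by unfold pvIdx; rw [hj]; rfl
      omega

-- A's dict-building loop, viewed on the key list only.
theorem pvA_keys (ws : List String) (d : PySem.Dict String Int) :
    (ws.foldl
      (fun (d : PySem.Dict String Int) word =>
        if pvOWC.contains word then
          match d.get? word with
          | none => d.insert word 0
          | some v => d.insert word (v + 1)
        else d) d).keys
    = ws.foldl
        (fun (acc : List String) w =>
          if pvOWC.contains w && !(acc.contains w) then acc ++ [w] else acc)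
        d.keys := by
  induction ws generalizing d with
  | nil => rfl
  | cons w ws ih =>
    by_cases hk : pvOWC.contains w = true
    · cases hg : d.get? w with
      | none =>
        have hmem : w ∉ d.keys := by
          simpa [PySem.Dict.get?_eq_none_iff_not_mem_keys] using hg
        have hcont : d.contains w = false := by
          rw [PySem.Dict.contains_eq_isSome_get?, hg]; rfl
        have hkeys : (d.insert w 0).keys = d.keys ++ [w] :=
          PySem.Dict.keys_insert_of_not_contains _ _ hcont
        have hlc : d.keys.contains w = false := by
          simpa using hmem
        simp only [List.foldl_cons, hk, hg, hlc, Bool.not_false, Bool.and_self, if_true]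
        rw [ih, hkeys]
      | some v =>
        have hmem : w ∈ d.keys := by
          have hne : d.get? w ≠ none := by simp [hg]
          by_contra hnm
          exact hne ((PySem.Dict.get?_eq_none_iff_not_mem_keys d w).2 hnm)
        have hcont : d.contains w = true := by
          rw [PySem.Dict.contains_eq_isSome_get?, hg]; rfl
        have hkeys : (d.insert w (v + 1)).keys = d.keys :=
          PySem.Dict.keys_insert_of_contains _ _ hcont
        have hlc : d.keys.contains w = true := by simpa using hmem
        simp only [List.foldl_cons, hk, hg, hlc, Bool.not_true, Bool.and_false,
          Bool.false_eq_true, if_false]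
        rw [if_pos trivial, ih, hkeys]
    · have hk' : pvOWC.contains w = false := by simpa using hk
      simp only [List.foldl_cons, hk', Bool.false_and, Bool.false_eq_true, if_false]
      exact ih d

-- The seen-style fold equals the front recursion pvG.
theorem pvF_eq_pvG (ws : List String) (acc : List String) :
    ws.foldl
      (fun (acc : List String) w =>
        if pvOWC.contains w && !(acc.contains w) then acc ++ [w] else acc) acc
    = acc ++ (pvG ws).filter (fun c => !(acc.contains c)) := by
  induction ws generalizing acc with
  | nil => simp [pvG]
  | cons w ws ih =>
    by_cases hk : pvOWC.contains w = true
    · by_cases hm : acc.contains w = true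
      · simp only [List.foldl_cons, hk, hm, Bool.not_true, Bool.and_false,
          Bool.false_eq_true, if_false]
        rw [ih, pvG]
        simp only [hk, if_true, List.filter_cons, hm, Bool.not_true]
        rw [List.filter_filter]
        congr 1
        apply List.filter_congr
        intro c _
        by_cases hcw : c = w
        · subst hcw
          have hmm : c ∈ acc := by simpa using hm
          simp [hmm]
        · simp [bne_iff_ne, hcw]
      · have hm' : acc.contains w = false := by simpa using hm
        simp only [List.foldl_cons, hk, hm', Bool.not_false, Bool.and_self, if_true]
        rw [ih, pvG]
        simp only [hk, if_true, List.filter_cons, hm', Bool.not_false, if_true]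
        rw [List.filter_filter, List.append_assoc, List.singleton_append]
        congr 2
        apply List.filter_congr
        intro c _
        by_cases hcw : c = w
        · subst hcw; simp
        · simp [bne_iff_ne, hcw]
    · have hk' : pvOWC.contains w = false := by simpa using hk
      simp only [List.foldl_cons, hk', Bool.false_and, Bool.false_eq_true, if_false]
      rw [ih, pvG]
      simp [hk']

-- A in closed form: map over the first-occurrence keyword list.
theorem pvA_closed (text : String) :
    searchForCountries text
      = (pvG (PySem.Str.split₀ text)).map (fun c => (pvName c, (1 : Int))) := by
  show (List.foldl
      (fun (d : PySem.Dict String Int) word =>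
        if pvOWC.contains word then
          match d.get? word with
          | none => d.insert word 0
          | some v => d.insert word (v + 1)
        else d) PySem.Dict.empty (PySem.Str.split₀ text)).keys.map
      (fun country => ((pvOWC.get? country).getD "", (1 : Int)))
    = _
  rw [pvA_keys, pvF_eq_pvG]
  simp [PySem.Dict.keys_empty, pvName]

-- pvOWC as a literal item list.
theorem pvOWC_eq :
    pvOWC = PySem.Dict.mk [("Saudi", "Saudi Arabia"), ("Korea", "South Korea"),
      ("Emirates", "United Arab Emirates"), ("Britian", "Great Britain")] := by
  decide

theorem pvName_Saudi : pvName "Saudi" = "Saudi Arabia" := by decide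
theorem pvName_Korea : pvName "Korea" = "South Korea" := by decide
theorem pvName_Emirates : pvName "Emirates" = "United Arab Emirates" := by decide
theorem pvName_Britian : pvName "Britian" = "Great Britain" := by decide

-- pvOWC membership as a literal key list.
theorem pvOWC_contains_iff (c : String) :
    pvOWC.contains c = true ↔ c ∈ ["Saudi", "Korea", "Emirates", "Britian"] := by
  rw [pvOWC_eq]
  simp [pysem]
  tauto

-- B's hits loop, as a map over the filtered literal key list.
theorem pvHits_eq (words : List String) :
    (PySem.Dict.items pvOWC).foldl
      (fun (acc : List (Nat × String)) kv =>
        if words.contains kv.1 then acc ++ [((PySem.List.index? words kv.1).getD 0, kv.2)]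
        else acc) []
    = (["Saudi", "Korea", "Emirates", "Britian"].filter
        (fun k => words.contains k)).map (fun k => (pvIdx words k, pvName k)) := by
  rw [pvOWC_eq]
  by_cases h1 : "Saudi" ∈ words <;> by_cases h2 : "Korea" ∈ words <;>
    by_cases h3 : "Emirates" ∈ words <;> by_cases h4 : "Britian" ∈ words <;>
    simp [h1, h2, h3, h4, pvIdx, pvName_Saudi, pvName_Korea,
      pvName_Emirates, pvName_Britian]

theorem pvPerm (words : List String) :
    (pvG words).Perm
      (["Saudi", "Korea", "Emirates", "Britian"].filter (fun k => words.contains k)) := by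
  have hnd1 := pvG_nodup words
  have hnd2 : (["Saudi", "Korea", "Emirates", "Britian"].filter
      (fun k => words.contains k)).Nodup :=
    List.Nodup.filter _ (by decide)
  rw [List.perm_ext_iff_of_nodup hnd1 hnd2]
  intro c
  rw [pvG_mem, List.mem_filter, ← pvOWC_contains_iff]
  simp [and_comm]

-- ===== VERDICT (by name: the statement is the Claim_ definition above) =====
theorem searchForCountries_spec : Claim_equal_searchForCountries := by
  intro text _
  unfold Spec_searchForCountries
  rw [pvA_closed]
  unfold searchForCountries_alt
  simp only []
  rw [pvHits_eq]
  set words := PySem.Str.split₀ text with hw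
  have hperm : ((pvG words).map (fun k => (pvIdx words k, pvName k))).Perm
      ((["Saudi", "Korea", "Emirates", "Britian"].filter
        (fun k => words.contains k)).map (fun k => (pvIdx words k, pvName k))) :=
    (pvPerm words).map _
  have hpair : ((pvG words).map (fun k => (pvIdx words k, pvName k))).Pairwise
      (fun a b => (fun (h : Nat × String) => h.1) a < (fun (h : Nat × String) => h.1) b) := by
    rw [List.pairwise_map]
    exact pvG_pairwise words
  have hs := PySem.List.sorted_eq_of_perm_of_pairwise_lt
    ((["Saudi", "Korea", "Emirates", "Britian"].filter
        (fun k => words.contains k)).map (fun k => (pvIdx words k, pvName k)))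
    ((pvG words).map (fun k => (pvIdx words k, pvName k)))
    (fun (h : Nat × String) => h.1) hperm hpair
  rw [hs, List.map_map]
  rfl
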